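-- pv_equiv track=rewrite | github.com/rossby-sh/romsforge | packages/nipa_auto/src/preprocess/get_gfs_frcst.py | select_instant
-- ===== SOURCE A (Python) =====
-- from typing import Any, List, Tuple, Optional, Dict
--
-- def grep_lines(lines: List[str], pattern: str) -> List[str]:
--     return [ln for ln in lines if pattern in ln]
--
-- def select_instant(inv: List[str]) -> Tuple[List[str], List[str]]:
--     """
--     instant: u10 v10 t2m spfh2m prmsl cloud
--     """
--     want = {
--         "u10":   ":UGRD:10 m above ground:",
--         "v10":   ":VGRD:10 m above ground:",
--         "tair":  ":TMP:2 m above ground:",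
--         "qair":  ":SPFH:2 m above ground:",
--         "pair":  ":PRMSL:mean sea level:",
--         "cloud": ":TCDC:entire atmosphere:",
--     }
--
--     picked: Dict[str, Optional[str]] = {k: None for k in want}
--     for k, pat in want.items():
--         lst = grep_lines(inv, pat)
--         if lst:
--             picked[k] = lst[0]
--
--     # cloud는 optional
--     missing = [k for k in ["u10","v10","tair","qair","pair"] if picked[k] is None]
--     out_lines = [picked[k] for k in ["u10","v10","tair","qair","pair"] if picked[k] is not None]
--     if picked["cloud"] is not None:
--         out_lines.append(picked["cloud"])
--     return out_lines, missing
-- ===== SOURCE B (Python) =====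
-- from typing import List, Tuple, Optional, Dict
--
-- _WANT = [
--     ("u10",   ":UGRD:10 m above ground:"),
--     ("v10",   ":VGRD:10 m above ground:"),
--     ("tair",  ":TMP:2 m above ground:"),
--     ("qair",  ":SPFH:2 m above ground:"),
--     ("pair",  ":PRMSL:mean sea level:"),
--     ("cloud", ":TCDC:entire atmosphere:"),
-- ]
--
-- def select_instant(inv: List[str]) -> Tuple[List[str], List[str]]:
--     """
--     instant: u10 v10 t2m spfh2m prmsl cloud
--     """
--     picked: Dict[str, Optional[str]] = {k: None for k, _ in _WANT}
--     for ln in inv:  # single pass: keep the first matching line per key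
--         for k, pat in _WANT:
--             if picked[k] is None and pat in ln:
--                 picked[k] = ln
--     missing = [k for k, _ in _WANT[:5] if picked[k] is None]
--     out_lines = [picked[k] for k, _ in _WANT[:5] if picked[k] is not None]
--     if picked["cloud"] is not None:
--         out_lines.append(picked["cloud"])
--     return out_lines, missing
-- ===== Notes on version B (the rewrite author's own statement) =====
-- stated objective: alternative
-- what changed: B replaces A's six independent full rescans of the inventory (one grep per variable, each building a throwaway matched list) by a single pass over inv that records the first matching line per key in place.
import Mathlib
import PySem

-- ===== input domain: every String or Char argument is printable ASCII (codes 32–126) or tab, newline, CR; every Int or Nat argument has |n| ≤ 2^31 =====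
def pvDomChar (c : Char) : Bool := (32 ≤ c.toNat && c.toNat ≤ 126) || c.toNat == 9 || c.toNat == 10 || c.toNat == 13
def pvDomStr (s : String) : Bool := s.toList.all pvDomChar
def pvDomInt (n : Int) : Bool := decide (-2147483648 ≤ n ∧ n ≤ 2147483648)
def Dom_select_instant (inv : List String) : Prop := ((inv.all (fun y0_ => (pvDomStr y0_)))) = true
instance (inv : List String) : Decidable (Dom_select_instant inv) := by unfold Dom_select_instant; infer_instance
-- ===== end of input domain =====

-- B replaces A's six full rescans of the inventory by one pass keeping the first match per key (objective: alternative/simpler traversal).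

-- ===== PORT A =====
-- grep_lines: all lines containing the pattern
def grepLines (lines : List String) (pattern : String) : List String :=
  lines.filter (fun ln => PySem.Str.isIn pattern ln)

-- A's loop body for one key: picked[k] = lst[0] if grep result nonempty, else stays None
def pickA (inv : List String) (pat : String) : Option String :=
  match grepLines inv pat with
  | [] => none
  | x :: _ => some x

def select_instant (inv : List String) : List String × List String :=
  -- the dict loop over `want` unrolled over its six fixed (key, pattern) entries, in order
  let u10   := pickA inv ":UGRD:10 m above ground:"
  let v10   := pickA inv ":VGRD:10 m above ground:"
  let tair  := pickA inv ":TMP:2 m above ground:"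
  let qair  := pickA inv ":SPFH:2 m above ground:"
  let pair  := pickA inv ":PRMSL:mean sea level:"
  let cloud := pickA inv ":TCDC:entire atmosphere:"
  let kv : List (String × Option String) :=
    [("u10", u10), ("v10", v10), ("tair", tair), ("qair", qair), ("pair", pair)]
  let missing := (kv.filter (fun p => p.2 = none)).map Prod.fst
  let outLines := kv.filterMap Prod.snd
  let outLines := match cloud with
    | some c => outLines ++ [c]
    | none => outLines
  (outLines, missing)

-- ===== PORT B =====
-- 'if picked[k] is None and pat in ln: picked[k] = ln'
def updB (o : Option String) (pat ln : String) : Option String :=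
  match o with
  | some v => some v
  | none => if PySem.Str.isIn pat ln then some ln else none

def PickedSt : Type :=
  Option String × Option String × Option String × Option String × Option String × Option String

def select_instant_alt (inv : List String) : List String × List String :=
  -- one pass over inv, updating all six slots of `picked`
  let st : PickedSt := inv.foldl
    (fun (s : PickedSt) ln =>
      (updB s.1 ":UGRD:10 m above ground:" ln,
       updB s.2.1 ":VGRD:10 m above ground:" ln,
       updB s.2.2.1 ":TMP:2 m above ground:" ln,
       updB s.2.2.2.1 ":SPFH:2 m above ground:" ln,
       updB s.2.2.2.2.1 ":PRMSL:mean sea level:" ln,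
       updB s.2.2.2.2.2 ":TCDC:entire atmosphere:" ln))
    (none, none, none, none, none, none)
  let kv : List (String × Option String) :=
    [("u10", st.1), ("v10", st.2.1), ("tair", st.2.2.1), ("qair", st.2.2.2.1), ("pair", st.2.2.2.2.1)]
  let missing := (kv.filter (fun p => p.2 = none)).map Prod.fst
  let outLines := kv.filterMap Prod.snd
  let outLines := match st.2.2.2.2.2 with
    | some c => outLines ++ [c]
    | none => outLines
  (outLines, missing)

-- ===== PRECONDITION & SPEC =====
def Spec_select_instant (inv : List String) (out : List String × List String) : Prop := out = select_instant_alt inv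
instance (inv : List String) (out : List String × List String) : Decidable (Spec_select_instant inv out) := by unfold Spec_select_instant; infer_instance

-- ===== CLAIM (what is proved, stated in full; the proofs are below) =====
def Claim_equal_select_instant : Prop := ∀ (inv : List String), Dom_select_instant inv → Spec_select_instant inv (select_instant inv)

-- ===== LEMMAS AND PROOFS =====

-- once a slot is filled, the single-pass update never changes it
theorem foldl_updB_some (inv : List String) (pat v : String) :
    inv.foldl (fun o ln => updB o pat ln) (some v) = some v := by
  induction inv with
  | nil => rfl
  | cons a t ih => simpa [updB] using ih

-- the single-pass first-match fold computes exactly A's pick (head of the filtered list)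
theorem foldl_updB_none (inv : List String) (pat : String) :
    inv.foldl (fun o ln => updB o pat ln) none = pickA inv pat := by
  induction inv with
  | nil => rfl
  | cons a t ih =>
    rw [List.foldl_cons]
    by_cases h : PySem.Chars.isIn pat.toList a.toList = true
    · rw [show updB none pat a = some a from by simp [updB, PySem.Str.isIn, h], foldl_updB_some]
      simp [pickA, grepLines, PySem.Str.isIn, h]
    · rw [show updB none pat a = none from by simp [updB, PySem.Str.isIn, h], ih]
      simp [pickA, grepLines, PySem.Str.isIn, h]

theorem alt_state (inv : List String) :
    (inv.foldl
      (fun (s : PickedSt) ln =>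
        (updB s.1 ":UGRD:10 m above ground:" ln,
         updB s.2.1 ":VGRD:10 m above ground:" ln,
         updB s.2.2.1 ":TMP:2 m above ground:" ln,
         updB s.2.2.2.1 ":SPFH:2 m above ground:" ln,
         updB s.2.2.2.2.1 ":PRMSL:mean sea level:" ln,
         updB s.2.2.2.2.2 ":TCDC:entire atmosphere:" ln))
      ((none, none, none, none, none, none) : PickedSt))
    = (pickA inv ":UGRD:10 m above ground:",
       pickA inv ":VGRD:10 m above ground:",
       pickA inv ":TMP:2 m above ground:",
       pickA inv ":SPFH:2 m above ground:",
       pickA inv ":PRMSL:mean sea level:",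
       pickA inv ":TCDC:entire atmosphere:") := by
  rw [show ∀ l : List String, ∀ s1 s2 s3 s4 s5 s6 : Option String, l.foldl
      (fun (s : PickedSt) ln =>
        (updB s.1 ":UGRD:10 m above ground:" ln,
         updB s.2.1 ":VGRD:10 m above ground:" ln,
         updB s.2.2.1 ":TMP:2 m above ground:" ln,
         updB s.2.2.2.1 ":SPFH:2 m above ground:" ln,
         updB s.2.2.2.2.1 ":PRMSL:mean sea level:" ln,
         updB s.2.2.2.2.2 ":TCDC:entire atmosphere:" ln))
      ((s1, s2, s3, s4, s5, s6) : PickedSt) =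
      (l.foldl (fun o ln => updB o ":UGRD:10 m above ground:" ln) s1,
       l.foldl (fun o ln => updB o ":VGRD:10 m above ground:" ln) s2,
       l.foldl (fun o ln => updB o ":TMP:2 m above ground:" ln) s3,
       l.foldl (fun o ln => updB o ":SPFH:2 m above ground:" ln) s4,
       l.foldl (fun o ln => updB o ":PRMSL:mean sea level:" ln) s5,
       l.foldl (fun o ln => updB o ":TCDC:entire atmosphere:" ln) s6)
    from fun l => by
      induction l with
      | nil => intro s1 s2 s3 s4 s5 s6; rfl
      | cons x t ih =>
        intro s1 s2 s3 s4 s5 s6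
        simp only [List.foldl_cons]
        exact ih _ _ _ _ _ _]
  simp [foldl_updB_none]

-- ===== VERDICT (by name: the statement is the Claim_ definition above) =====
theorem select_instant_spec : Claim_equal_select_instant := by
  intro inv _
  unfold Spec_select_instant select_instant select_instant_alt
  rw [alt_state]
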